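-- pv_equiv track=rewrite | github.com/Kuleng/CMSC-12-Project | othellofinal.py | point_counter
-- ===== SOURCE A (Python) =====
-- def point_counter(maindat): #Loops the board and adds points per W and B
-- 	score = [0,0]
-- 	for row in maindat:
-- 		for box in row:
-- 		 	if box == "[W]":
-- 		 		score[0] += 1
-- 		 	elif box == "[B]":
-- 		 		score[1] += 1
-- 	return score
-- ===== SOURCE B (Python) =====
-- def point_counter(maindat):
--     flat = [box for row in maindat for box in row]
--     return [flat.count("[W]"), flat.count("[B]")]
-- ===== Notes on version B (the rewrite author's own statement) =====
-- stated objective: alternative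
-- what changed: Replaced the single accumulating nested loop over an in-place score list by flattening the board with a comprehension and computing each count with a separate .count scan.
import Mathlib
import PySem

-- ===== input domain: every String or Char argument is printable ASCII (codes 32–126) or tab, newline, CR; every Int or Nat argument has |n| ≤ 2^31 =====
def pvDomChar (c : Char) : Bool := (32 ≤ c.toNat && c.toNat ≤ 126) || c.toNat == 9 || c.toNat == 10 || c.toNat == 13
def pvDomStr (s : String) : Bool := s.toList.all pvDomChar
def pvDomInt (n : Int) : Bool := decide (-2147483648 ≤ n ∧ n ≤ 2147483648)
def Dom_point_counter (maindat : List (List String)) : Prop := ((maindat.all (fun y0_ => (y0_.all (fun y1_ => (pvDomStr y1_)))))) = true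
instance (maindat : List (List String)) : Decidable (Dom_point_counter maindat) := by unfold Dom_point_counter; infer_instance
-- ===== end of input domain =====

-- ===== PORT A =====
def point_counter (maindat : List (List String)) : List Int :=
  let score :=
    maindat.foldl (fun score row =>
      row.foldl (fun score box =>
        if box == "[W]" then (score.1 + 1, score.2)
        else if box == "[B]" then (score.1, score.2 + 1)
        else score) score) ((0 : Int), (0 : Int))
  [score.1, score.2]

-- ===== PORT B =====
def point_counter_alt (maindat : List (List String)) : List Int :=
  let flat := maindat.flatMap (fun row => row)
  [(PySem.List.count flat "[W]" : Int), (PySem.List.count flat "[B]" : Int)]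

-- ===== PRECONDITION & SPEC =====
def Spec_point_counter (maindat : List (List String)) (out : List Int) : Prop := out = point_counter_alt maindat
instance (maindat : List (List String)) (out : List Int) : Decidable (Spec_point_counter maindat out) := by unfold Spec_point_counter; infer_instance

-- ===== CLAIM (what is proved, stated in full; the proofs are below) =====
def Claim_equal_point_counter : Prop := ∀ (maindat : List (List String)), Dom_point_counter maindat → Spec_point_counter maindat (point_counter maindat)

-- ===== LEMMAS AND PROOFS =====

-- ===== VERDICT (by name: the statement is the Claim_ definition above) =====
theorem row_fold (row : List String) (w b : Int) :
    row.foldl (fun score box =>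
        if box == "[W]" then (score.1 + 1, score.2)
        else if box == "[B]" then (score.1, score.2 + 1)
        else score) (w, b)
    = (w + (row.count "[W]" : Int), b + (row.count "[B]" : Int)) := by
  induction row generalizing w b with
  | nil => simp
  | cons x xs ih =>
    simp only [List.foldl_cons]
    by_cases hW : (x == "[W]") = true
    · rw [if_pos hW, ih]
      simp only [beq_iff_eq] at hW
      simp [hW, Prod.ext_iff]; omega
    · rw [if_neg hW]
      by_cases hB : (x == "[B]") = true
      · rw [if_pos hB, ih]
        simp only [beq_iff_eq] at hW hB
        simp [hW, hB, Prod.ext_iff]; omega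
      · rw [if_neg hB, ih]
        simp only [beq_iff_eq] at hW hB
        simp [hW, hB]

theorem board_fold (maindat : List (List String)) (w b : Int) :
    maindat.foldl (fun score row =>
      row.foldl (fun score box =>
        if box == "[W]" then (score.1 + 1, score.2)
        else if box == "[B]" then (score.1, score.2 + 1)
        else score) score) (w, b)
    = (w + ((maindat.flatMap (fun row => row)).count "[W]" : Int),
       b + ((maindat.flatMap (fun row => row)).count "[B]" : Int)) := by
  induction maindat generalizing w b with
  | nil => simp
  | cons r rs ih =>
    simp only [List.foldl_cons]
    rw [row_fold, ih]
    simp [Prod.ext_iff]; omega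

theorem point_counter_spec : Claim_equal_point_counter := by
  intro maindat _
  unfold Spec_point_counter point_counter point_counter_alt
  rw [board_fold]
  simp [PySem.List.count]
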